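-- pv_equiv track=rewrite | github.com/gravelCompBio/Claspp_data_cur | getData/DataProcess.py | separate_old_and_new_data_v2
-- ===== SOURCE A (Python) =====
-- def separate_old_and_new_data_v2(uni2seq: dict[str:str], olduni2seq: dict[str:str], masterlist : list[str]):
--     """
--     update the uni ids to sequnece mappings and separate old and new data from dbPTM
--     Args:
--         uni2seq (dict[str:str]) : uniprot id 2 sequences
--         olduni2seq (dict[str:str]) : first round of fixed uniprot id 2 sequences
--         masterlist (list[str]) : masterlist of rawPTM data
--     Returns:
--         newunis (set[str]) : set of current uniprot ids
--         oldunis (set[str]) : set of out-of-date uniprot ids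
--     """
--     for uni in olduni2seq.keys():
--         uni2seq[uni]=olduni2seq[uni]
--     newunis=set()
--     oldunis=set()
--     for info in masterlist:
--         l=list(info.split('_'))
--         uni=l[0]
--         if uni in uni2seq.keys():
--             newunis.add(uni)
--         else:
--             oldunis.add(uni)
--
--     return newunis, oldunis
-- ===== SOURCE B (Python) =====
-- def separate_old_and_new_data_v2(uni2seq: dict, olduni2seq: dict, masterlist: list):
--     uni2seq.update(olduni2seq)
--     # mark-and-sweep with the join direction flipped: build a prefix table once,
--     # then scan the dict KEYS to mark known prefixes, then sweep the table apart
--     status = dict.fromkeys((info.split('_')[0] for info in masterlist), False)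
--     for uni in uni2seq:
--         if uni in status:
--             status[uni] = True
--     newunis = {uni for uni, known in status.items() if known}
--     oldunis = {uni for uni, known in status.items() if not known}
--     return newunis, oldunis
-- ===== Notes on version B (the rewrite author's own statement) =====
-- stated objective: alternative
-- what changed: B flips the join direction: instead of probing the merged dict for each masterlist element, it builds a prefix table once (dict.fromkeys), marks entries by scanning the merged dict's KEYS, and then sweeps the table apart into the two sets.
import Mathlib
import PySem

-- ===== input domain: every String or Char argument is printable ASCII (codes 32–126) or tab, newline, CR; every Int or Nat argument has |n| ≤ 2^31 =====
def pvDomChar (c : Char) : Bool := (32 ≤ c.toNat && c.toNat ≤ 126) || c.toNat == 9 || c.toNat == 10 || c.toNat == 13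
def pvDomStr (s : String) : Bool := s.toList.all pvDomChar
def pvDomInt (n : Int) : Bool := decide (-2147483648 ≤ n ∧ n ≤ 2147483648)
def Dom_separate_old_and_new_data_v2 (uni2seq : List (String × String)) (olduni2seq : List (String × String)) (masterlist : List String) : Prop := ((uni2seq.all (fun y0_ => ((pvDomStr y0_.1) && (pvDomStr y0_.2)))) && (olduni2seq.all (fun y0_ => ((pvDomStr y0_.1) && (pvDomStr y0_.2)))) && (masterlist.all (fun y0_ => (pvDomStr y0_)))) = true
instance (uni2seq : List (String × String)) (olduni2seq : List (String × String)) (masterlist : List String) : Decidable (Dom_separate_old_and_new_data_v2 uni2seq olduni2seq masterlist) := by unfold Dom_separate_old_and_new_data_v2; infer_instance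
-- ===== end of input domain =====

-- B flips the join direction: A probes the merged dict once per masterlist element and grows two
-- sets; B builds a prefix table once (dict.fromkeys), marks it by scanning the merged dict's KEYS,
-- then sweeps the table apart into the two sets — same return value; both Pythons also mutate
-- uni2seq in place (A's key loop = B's dict.update), the equivalence proved is about the return value.

-- ===== PORT A =====
def separate_old_and_new_data_v2 (uni2seq : List (String × String)) (olduni2seq : List (String × String)) (masterlist : List String) : List String × List String :=
  let old : PySem.Dict String String := ⟨olduni2seq⟩
  -- for uni in olduni2seq.keys(): uni2seq[uni] = olduni2seq[uni]
  -- (getD "" is exact: uni ranges over old's own keys, so the lookup never raises)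
  let merged := (PySem.Dict.keys old).foldl
      (fun d uni => PySem.Dict.insert d uni (PySem.Dict.getD old uni "")) ⟨uni2seq⟩
  masterlist.foldl
    (fun (acc : PySem.Set String × PySem.Set String) info =>
      let l := (PySem.Str.split? info "_").getD []   -- exact: the separator "_" is nonempty, split? is some
      let uni := (PySem.List.pyGet? l 0).getD ""   -- exact: splitOn never returns []
      if (PySem.Dict.keys merged).contains uni then (acc.1.add uni, acc.2)
      else (acc.1, acc.2.add uni))
    (PySem.Set.empty, PySem.Set.empty)

-- ===== PORT B =====
def separate_old_and_new_data_v2_alt (uni2seq : List (String × String)) (olduni2seq : List (String × String)) (masterlist : List String) : List String × List String :=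
  let merged := PySem.Dict.update (⟨uni2seq⟩ : PySem.Dict String String) olduni2seq
  -- status = dict.fromkeys((info.split('_')[0] for info in masterlist), False)
  let status0 : PySem.Dict String Bool :=
    (masterlist.map (fun info => ((PySem.Str.split? info "_").getD []).headD "")).foldl
      (fun d k => PySem.Dict.insert d k false) PySem.Dict.empty
  -- for uni in uni2seq: if uni in status: status[uni] = True
  let status := (PySem.Dict.keys merged).foldl
      (fun d uni => if PySem.Dict.contains d uni then PySem.Dict.insert d uni true else d) status0
  -- {uni for uni, known in status.items() if known}, {… if not known}
  (PySem.Set.ofList ((status.items.filter (fun p => p.2)).map (fun p => p.1)),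
   PySem.Set.ofList ((status.items.filter (fun p => !p.2)).map (fun p => p.1)))

-- ===== PRECONDITION & SPEC =====
def Spec_separate_old_and_new_data_v2 (uni2seq : List (String × String)) (olduni2seq : List (String × String)) (masterlist : List String) (out : List String × List String) : Prop := out = separate_old_and_new_data_v2_alt uni2seq olduni2seq masterlist
instance (uni2seq : List (String × String)) (olduni2seq : List (String × String)) (masterlist : List String) (out : List String × List String) : Decidable (Spec_separate_old_and_new_data_v2 uni2seq olduni2seq masterlist out) := by unfold Spec_separate_old_and_new_data_v2; infer_instance

-- ===== CLAIM (what is proved, stated in full; the proofs are below) =====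
def Claim_equal_separate_old_and_new_data_v2 : Prop := ∀ (uni2seq : List (String × String)) (olduni2seq : List (String × String)) (masterlist : List String), Dom_separate_old_and_new_data_v2 uni2seq olduni2seq masterlist → Spec_separate_old_and_new_data_v2 uni2seq olduni2seq masterlist (separate_old_and_new_data_v2 uni2seq olduni2seq masterlist)

-- ===== LEMMAS AND PROOFS =====

-- l[0] (with splitOn, hence also on the impossible []) agrees with headD ""
theorem pyGet0_eq_headD (l : List String) : (PySem.List.pyGet? l 0).getD "" = l.headD "" := by
  cases l <;> simp [PySem.List.pyGet?, PySem.List.pyIdx?]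

-- A's merged dict has the same key list as B's merged dict
theorem keys_merged_eq (uni2seq olduni2seq : List (String × String)) :
    PySem.Dict.keys ((PySem.Dict.keys (⟨olduni2seq⟩ : PySem.Dict String String)).foldl
      (fun d uni => PySem.Dict.insert d uni (PySem.Dict.getD (⟨olduni2seq⟩ : PySem.Dict String String) uni "")) ⟨uni2seq⟩)
    = PySem.Dict.keys (PySem.Dict.update (⟨uni2seq⟩ : PySem.Dict String String) olduni2seq) := by
  rw [PySem.Dict.keys_foldl_insert, PySem.Dict.update,
      PySem.Dict.keys_foldl_insert_key (key := Prod.fst) (f := fun _ p => p.2)]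
  rfl

-- A SIDE: the classification loop computes (filter P, filter !P) of the deduped prefix list

-- filtering commutes with Set.add
theorem filter_set_add (p : String → Bool) (s : PySem.Set String) (x : String) :
    (PySem.Set.add s x).filter p = if p x then PySem.Set.add (s.filter p) x else s.filter p := by
  by_cases hx : x ∈ s
  · have h1 : PySem.Set.add s x = s := by
      simp [PySem.Set.add, PySem.Set.contains_eq_listContains, hx]
    rw [h1]
    by_cases hp : p x = true
    · have hx2 : x ∈ s.filter p := List.mem_filter.mpr ⟨hx, hp⟩
      simp [hp, PySem.Set.add, PySem.Set.contains_eq_listContains, hx2]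
    · simp [hp]
  · have h1 : PySem.Set.add s x = s ++ [x] := by
      simp [PySem.Set.add, PySem.Set.contains_eq_listContains, hx]
    rw [h1, List.filter_append]
    by_cases hp : p x = true
    · have hx2 : x ∉ s.filter p := fun h => hx (List.mem_filter.mp h).1
      simp [hp, PySem.Set.add, PySem.Set.contains_eq_listContains, hx2]
    · simp [hp]

-- filtering commutes with building a set by repeated add
theorem filter_foldl_add (p : String → Bool) :
    ∀ (m : List String) (s : PySem.Set String),
      (m.foldl PySem.Set.add s).filter p = (m.filter p).foldl PySem.Set.add (s.filter p) := by
  intro m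
  induction m with
  | nil => intro s; rfl
  | cons x m ih =>
    intro s
    simp only [List.foldl_cons, ih, filter_set_add, List.filter_cons]
    by_cases hp : p x = true <;> simp [hp]

-- filtering commutes with Set.ofList
theorem filter_ofList (p : String → Bool) (m : List String) :
    (PySem.Set.ofList m).filter p = PySem.Set.ofList (m.filter p) := by
  simpa [PySem.Set.ofList, PySem.Set.empty] using filter_foldl_add p m []

-- the pair-state classification loop splits into two independent folds
theorem pair_fold_split (f : String → String) (P : String → Bool) :
    ∀ (l : List String) (s t : PySem.Set String),
      l.foldl (fun (acc : PySem.Set String × PySem.Set String) info =>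
          if P (f info) then (acc.1.add (f info), acc.2) else (acc.1, acc.2.add (f info))) (s, t)
      = (l.foldl (fun s' info => if P (f info) then PySem.Set.add s' (f info) else s') s,
         l.foldl (fun t' info => if P (f info) then t' else PySem.Set.add t' (f info)) t) := by
  intro l
  induction l with
  | nil => intro s t; rfl
  | cons x l ih =>
    intro s t
    by_cases hp : P (f x) = true <;> simp [hp, ih]

-- each one-sided fold is a filtered ofList
theorem fold_if_add_eq (f : String → String) (P : String → Bool) (l : List String) :
    l.foldl (fun s' info => if P (f info) then PySem.Set.add s' (f info) else s') PySem.Set.empty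
      = (PySem.Set.ofList (l.map f)).filter P := by
  rw [filter_ofList, PySem.Set.ofList,
      ← List.foldl_map (f := f) (g := fun s' u => if P u = true then PySem.Set.add s' u else s'),
      PySem.List.foldl_if_eq_foldl_filter P PySem.Set.add (l.map f) PySem.Set.empty]

theorem fold_if_skip_eq (f : String → String) (P : String → Bool) (l : List String) :
    l.foldl (fun t' info => if P (f info) then t' else PySem.Set.add t' (f info)) PySem.Set.empty
      = (PySem.Set.ofList (l.map f)).filter (fun u => !P u) := by
  have h : (fun (t' : PySem.Set String) info => if P (f info) = true then t' else PySem.Set.add t' (f info))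
       = fun t' info => if (!P (f info)) = true then PySem.Set.add t' (f info) else t' := by
    funext t' i; cases P (f i) <;> simp
  rw [h]
  exact fold_if_add_eq f (fun u => !P u) l

-- B SIDE

-- dict.fromkeys over a list = the deduped list tagged False
theorem items_fromkeys (m : List String) :
    ∀ (s : List String),
      (m.foldl (fun (d : PySem.Dict String Bool) k => PySem.Dict.insert d k false)
        ⟨s.map (fun k => (k, false))⟩).items
      = (m.foldl PySem.Set.add s).map (fun k => (k, false)) := by
  induction m with
  | nil => intro s; rfl
  | cons x m ih =>
    intro s
    have hk : (PySem.Dict.mk (s.map (fun k => (k, false)))).contains x = s.contains x := by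
      simp [PySem.Dict.contains_eq_decide_mem_keys, PySem.Dict.keys]
    by_cases hx : s.contains x = true
    · have hins : PySem.Dict.insert (⟨s.map (fun k => (k, false))⟩ : PySem.Dict String Bool) x false
          = ⟨s.map (fun k => (k, false))⟩ := by
        apply PySem.Dict.ext
        rw [PySem.Dict.items_insert, if_pos (by rw [hk]; exact hx)]
        simp only [List.map_map]
        apply List.map_congr_left
        intro k _
        by_cases h : k = x <;> simp [h]
      have hadd : PySem.Set.add s x = s := by
        simp [PySem.Set.add, PySem.Set.contains_eq_listContains, List.contains_iff_mem.mp hx]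
      simp only [List.foldl_cons, hins, hadd, ih]
    · have hins : PySem.Dict.insert (⟨s.map (fun k => (k, false))⟩ : PySem.Dict String Bool) x false
          = ⟨(s ++ [x]).map (fun k => (k, false))⟩ := by
        apply PySem.Dict.ext
        rw [PySem.Dict.items_insert, if_neg (by rw [hk]; simpa using hx)]
        simp
      have hadd : PySem.Set.add s x = s ++ [x] := by
        simp only [PySem.Set.add, PySem.Set.contains_eq_listContains]
        rw [if_neg (by simpa using hx)]
      simp only [List.foldl_cons, hins, hadd, ih]

-- the marking loop: every table entry ends up tagged with membership in the scanned key list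
theorem items_mark (ks : List String) :
    ∀ (g : String → Bool) (s : List String),
      (ks.foldl (fun (d : PySem.Dict String Bool) uni =>
          if PySem.Dict.contains d uni then PySem.Dict.insert d uni true else d)
        ⟨s.map (fun k => (k, g k))⟩).items
      = s.map (fun k => (k, g k || ks.contains k)) := by
  induction ks with
  | nil => intro g s; simp
  | cons u ks ih =>
    intro g s
    have hk : (PySem.Dict.mk (s.map (fun k => (k, g k)))).contains u = s.contains u := by
      simp [PySem.Dict.contains_eq_decide_mem_keys, PySem.Dict.keys]
    by_cases hu : s.contains u = true
    · have hins : PySem.Dict.insert (⟨s.map (fun k => (k, g k))⟩ : PySem.Dict String Bool) u true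
          = ⟨s.map (fun k => (k, if k == u then true else g k))⟩ := by
        apply PySem.Dict.ext
        rw [PySem.Dict.items_insert, if_pos (by rw [hk]; exact hu)]
        simp only [List.map_map]
        apply List.map_congr_left
        intro k _
        by_cases h : k = u <;> simp [h]
      simp only [List.foldl_cons, hk, hu, if_true, hins,
        ih (fun k => if k == u then true else g k) s]
      apply List.map_congr_left
      intro k _
      by_cases h : k = u <;> simp [h]
    · simp only [List.foldl_cons, hk, hu, if_false, Bool.false_eq_true, ih g s]
      apply List.map_congr_left
      intro k hkmem
      have hne : k ≠ u := by
        intro h; subst h; exact hu (List.contains_iff_mem.mpr hkmem)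
      simp [hne]

-- picking the tagged keys out of the table is a plain filter
theorem filter_tagged_pos (s : List String) (P : String → Bool) :
    (((s.map (fun k => (k, P k))).filter (fun p => p.2)).map (fun p => p.1))
      = s.filter P := by
  induction s with
  | nil => rfl
  | cons x s ih =>
    simp only [List.map_cons, List.filter_cons]
    by_cases h : P x = true <;> simp [h, ih]

theorem filter_tagged_neg (s : List String) (P : String → Bool) :
    (((s.map (fun k => (k, P k))).filter (fun p => !p.2)).map (fun p => p.1))
      = s.filter (fun k => !P k) := by
  induction s with
  | nil => rfl
  | cons x s ih =>
    simp only [List.map_cons, List.filter_cons]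
    by_cases h : P x = true <;> simp [h, ih]

-- set() of a duplicate-free list is the list itself
theorem ofList_of_nodup : ∀ (l : List String), l.Nodup → PySem.Set.ofList l = l := by
  have key : ∀ (l s : List String), (s ++ l).Nodup →
      l.foldl PySem.Set.add s = s ++ l := by
    intro l
    induction l with
    | nil => intro s _; simp
    | cons x l ih =>
      intro s hnd
      have hxm : x ∉ s := by
        intro hmem
        exact List.disjoint_of_nodup_append hnd hmem (by simp)
      have hadd : PySem.Set.add s x = s ++ [x] := by
        simp only [PySem.Set.add, PySem.Set.contains_eq_listContains]
        rw [if_neg (by simpa using hxm)]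
      have : ((s ++ [x]) ++ l).Nodup := by simpa [List.append_assoc] using hnd
      simp only [List.foldl_cons, hadd, ih (s ++ [x]) this, List.append_assoc,
        List.singleton_append]
  intro l h
  simpa using key l [] (by simpa using h)

-- B's result, characterised
theorem alt_eq_filters (uni2seq olduni2seq : List (String × String)) (masterlist : List String) :
    separate_old_and_new_data_v2_alt uni2seq olduni2seq masterlist
      = (let ks := PySem.Dict.keys (PySem.Dict.update (⟨uni2seq⟩ : PySem.Dict String String) olduni2seq)
         let pref := PySem.Set.ofList
             (masterlist.map (fun info => ((PySem.Str.split? info "_").getD []).headD ""))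
         (pref.filter (fun u => ks.contains u), pref.filter (fun u => !ks.contains u))) := by
  simp only [separate_old_and_new_data_v2_alt]
  have h0 := items_fromkeys
      (masterlist.map (fun info => ((PySem.Str.split? info "_").getD []).headD "")) []
  simp only [List.map_nil] at h0
  have hd0 : (masterlist.map (fun info => ((PySem.Str.split? info "_").getD []).headD "")).foldl
      (fun (d : PySem.Dict String Bool) k => PySem.Dict.insert d k false) PySem.Dict.empty
      = ⟨(PySem.Set.ofList (masterlist.map (fun info => ((PySem.Str.split? info "_").getD []).headD ""))).map
          (fun k => (k, false))⟩ := by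
    apply PySem.Dict.ext
    exact h0
  rw [hd0, items_mark]
  have hpref : (PySem.Set.ofList (masterlist.map (fun info => ((PySem.Str.split? info "_").getD []).headD ""))).Nodup :=
    PySem.Set.nodup_ofList _
  simp only [Bool.false_or, filter_tagged_pos, filter_tagged_neg, Prod.mk.injEq]
  exact ⟨ofList_of_nodup _ (List.Nodup.filter _ hpref),
    ofList_of_nodup _ (List.Nodup.filter _ hpref)⟩

theorem separate_eq (uni2seq olduni2seq : List (String × String)) (masterlist : List String) :
    separate_old_and_new_data_v2 uni2seq olduni2seq masterlist
      = separate_old_and_new_data_v2_alt uni2seq olduni2seq masterlist := by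
  rw [alt_eq_filters]
  simp only [separate_old_and_new_data_v2, pyGet0_eq_headD, keys_merged_eq]
  rw [pair_fold_split (f := fun info => ((PySem.Str.split? info "_").getD []).headD "")
        (P := fun u => (PySem.Dict.keys (PySem.Dict.update (⟨uni2seq⟩ : PySem.Dict String String) olduni2seq)).contains u),
      fold_if_add_eq, fold_if_skip_eq]

-- ===== VERDICT (by name: the statement is the Claim_ definition above) =====
theorem separate_old_and_new_data_v2_spec : Claim_equal_separate_old_and_new_data_v2 := by
  intro u o m _
  show _ = _
  exact separate_eq u o m
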